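-- pv_equiv track=rewrite | github.com/Georgios264/FERI-Projects | src/auto_copy.py | _strip_blank_rows
-- ===== SOURCE A (Python) =====
-- from typing import Iterable, List, Optional
--
-- def _strip_blank_rows(rows: List[List[object]], allowed_consecutive: int) -> List[List[object]]:
--     cleaned: List[List[object]] = []
--     blank_run = 0
--     for row in rows:
--         is_blank = all(cell is None or (isinstance(cell, str) and not cell.strip()) for cell in row)
--         if is_blank:
--             blank_run += 1
--             if blank_run > allowed_consecutive:
--                 break
--             continue
--         blank_run = 0
--         cleaned.append(row)
--     return cleaned
-- ===== SOURCE B (Python) =====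
-- from itertools import groupby
-- from typing import List, Optional
--
-- def _strip_blank_rows(rows, allowed_consecutive):
--     def is_blank(row):
--         return all(cell is None or (isinstance(cell, str) and not cell.strip()) for cell in row)
--     cleaned = []
--     for blank, group in groupby(rows, key=is_blank):
--         run = list(group)
--         if blank:
--             if len(run) > allowed_consecutive:
--                 break
--         else:
--             cleaned.extend(run)
--     return cleaned
-- ===== Notes on version B (the rewrite author's own statement) =====
-- stated objective: idiomatic
-- what changed: Replaced the running blank-counter with an itertools.groupby segmentation into blank/non-blank runs: non-blank runs are extended into the result, and the loop breaks at the first blank run longer than allowed_consecutive.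
import Mathlib
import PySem

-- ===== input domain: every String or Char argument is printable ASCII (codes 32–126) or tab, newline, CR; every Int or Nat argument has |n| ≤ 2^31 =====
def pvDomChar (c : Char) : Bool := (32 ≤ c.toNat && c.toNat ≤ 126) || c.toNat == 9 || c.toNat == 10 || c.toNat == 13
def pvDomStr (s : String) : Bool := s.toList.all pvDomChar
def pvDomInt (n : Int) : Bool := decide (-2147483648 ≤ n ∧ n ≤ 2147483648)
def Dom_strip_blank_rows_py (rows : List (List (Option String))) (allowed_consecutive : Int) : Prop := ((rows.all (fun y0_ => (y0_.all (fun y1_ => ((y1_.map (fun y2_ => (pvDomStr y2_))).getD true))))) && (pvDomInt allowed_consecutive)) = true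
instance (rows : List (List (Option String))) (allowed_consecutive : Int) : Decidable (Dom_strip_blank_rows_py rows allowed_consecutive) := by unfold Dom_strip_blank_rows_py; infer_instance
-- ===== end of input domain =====

-- ===== PORT A =====
-- B replaces A's running blank-counter by a groupby-into-runs decomposition (idiomatic); same cost.
-- blank cell: None, or a string that strips to empty (Python: cell is None or not cell.strip())
def pvIsBlankRow (row : List (Option String)) : Bool :=
  row.all (fun cell => match cell with
    | none => true
    | some s => PySem.Str.strip s == "")

-- the for-loop with blank_run state and early break, transliterated as structural recursion
def pvALoop (allowed : Int) : List (List (Option String)) → Int → List (List (Option String))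
  | [], _ => []
  | row :: rest, blank_run =>
    if pvIsBlankRow row then
      if blank_run + 1 > allowed then []
      else pvALoop allowed rest (blank_run + 1)
    else row :: pvALoop allowed rest 0

def strip_blank_rows_py (rows : List (List (Option String))) (allowed_consecutive : Int) : List (List (Option String)) :=
  pvALoop allowed_consecutive rows 0

-- ===== PORT B =====
-- itertools.groupby(rows, key=pvIsBlankRow): maximal runs of rows sharing their blankness
def pvGroupRuns : List (List (Option String)) → List (Bool × List (List (Option String)))
  | [] => []
  | r :: rs =>
    let g := rs.takeWhile (fun x => pvIsBlankRow x == pvIsBlankRow r)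
    let rest := rs.dropWhile (fun x => pvIsBlankRow x == pvIsBlankRow r)
    (pvIsBlankRow r, r :: g) :: pvGroupRuns rest
termination_by l => l.length
decreasing_by
  simp only [List.length_cons]
  exact Nat.lt_succ_of_le (List.length_dropWhile_le _ _)

-- the for-loop over runs, with its break
def pvBLoop (allowed : Int) : List (Bool × List (List (Option String))) → List (List (Option String))
  | [] => []
  | (blank, run) :: rest =>
    if blank then
      if (run.length : Int) > allowed then []
      else pvBLoop allowed rest
    else run ++ pvBLoop allowed rest

def strip_blank_rows_py_alt (rows : List (List (Option String))) (allowed_consecutive : Int) : List (List (Option String)) :=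
  pvBLoop allowed_consecutive (pvGroupRuns rows)

-- ===== PRECONDITION & SPEC =====
def Spec_strip_blank_rows_py (rows : List (List (Option String))) (allowed_consecutive : Int) (out : List (List (Option String))) : Prop := out = strip_blank_rows_py_alt rows allowed_consecutive
instance (rows : List (List (Option String))) (allowed_consecutive : Int) (out : List (List (Option String))) : Decidable (Spec_strip_blank_rows_py rows allowed_consecutive out) := by unfold Spec_strip_blank_rows_py; infer_instance

-- ===== CLAIM (what is proved, stated in full; the proofs are below) =====
def Claim_equal_strip_blank_rows_py : Prop := ∀ (rows : List (List (Option String))) (allowed_consecutive : Int), Dom_strip_blank_rows_py rows allowed_consecutive → Spec_strip_blank_rows_py rows allowed_consecutive (strip_blank_rows_py rows allowed_consecutive)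

-- ===== LEMMAS AND PROOFS =====

-- A's loop across a blank block without exceeding the allowance just advances the counter
theorem pvALoop_blank_ok (allowed : Int) (g : List (List (Option String)))
    (hg : ∀ x ∈ g, pvIsBlankRow x = true) (rest : List (List (Option String))) (run : Int)
    (h : run + g.length ≤ allowed) :
    pvALoop allowed (g ++ rest) run = pvALoop allowed rest (run + g.length) := by
  induction g generalizing run with
  | nil => simp
  | cons x g' ih =>
    have hx : pvIsBlankRow x = true := hg x (by simp)
    have hlen : ((x :: g').length : Int) = 1 + g'.length := by
      simp [List.length_cons]; ring
    simp only [List.cons_append, pvALoop, hx, if_true]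
    rw [if_neg (by rw [hlen] at h; omega)]
    rw [ih (fun y hy => hg y (by simp [hy])) (run + 1) (by rw [hlen] at h; omega)]
    congr 1
    rw [hlen]; ring

-- A's loop across a nonempty blank block that exceeds the allowance breaks, discarding the tail
theorem pvALoop_blank_break (allowed : Int) (g : List (List (Option String)))
    (hg : ∀ x ∈ g, pvIsBlankRow x = true) (rest : List (List (Option String))) (run : Int)
    (hne : g ≠ []) (h : run + g.length > allowed) :
    pvALoop allowed (g ++ rest) run = [] := by
  induction g generalizing run with
  | nil => exact absurd rfl hne
  | cons x g' ih =>
    have hx : pvIsBlankRow x = true := hg x (by simp)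
    simp only [List.cons_append, pvALoop, hx, if_true]
    by_cases hb : run + 1 > allowed
    · rw [if_pos hb]
    · rw [if_neg hb]
      rcases g' with _ | ⟨y, g''⟩
      · simp at h; omega
      · exact ih (fun y hy => hg y (by simp [hy])) (run + 1)
          (by simp) (by simp at h ⊢; omega)

-- A's loop appends a non-blank block verbatim, resetting the counter
theorem pvALoop_nonblank (allowed : Int) (g : List (List (Option String)))
    (hg : ∀ x ∈ g, pvIsBlankRow x = false) (rest : List (List (Option String))) :
    pvALoop allowed (g ++ rest) 0 = g ++ pvALoop allowed rest 0 := by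
  induction g with
  | nil => simp
  | cons x g' ih =>
    have hx : pvIsBlankRow x = false := hg x (by simp)
    simp only [List.cons_append, pvALoop, hx]
    simp [ih (fun y hy => hg y (by simp [hy]))]

-- the counter is irrelevant when the list is empty or starts non-blank
theorem pvALoop_reset (allowed : Int) (rest : List (List (Option String))) (run : Int)
    (h : rest = [] ∨ ∃ y ys, rest = y :: ys ∧ pvIsBlankRow y = false) :
    pvALoop allowed rest run = pvALoop allowed rest 0 := by
  rcases h with h | ⟨y, ys, rfl, hy⟩
  · subst h; rfl
  · simp [pvALoop, hy]

theorem main_lemma (allowed : Int) (rs : List (List (Option String))) :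
    pvALoop allowed rs 0 = pvBLoop allowed (pvGroupRuns rs) := by
  induction rs using pvGroupRuns.induct with
  | case1 => simp [pvGroupRuns, pvALoop, pvBLoop]
  | case2 r rs' grp ihx =>
    have hsplit : r :: rs' =
        (r :: rs'.takeWhile (fun x => pvIsBlankRow x == pvIsBlankRow r)) ++
          rs'.dropWhile (fun x => pvIsBlankRow x == pvIsBlankRow r) := by
      simp [List.takeWhile_append_dropWhile]
    have hg : ∀ x ∈ r :: rs'.takeWhile (fun x => pvIsBlankRow x == pvIsBlankRow r),
        pvIsBlankRow x = pvIsBlankRow r := by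
      intro x hx
      rcases List.mem_cons.mp hx with rfl | hx'
      · rfl
      · simpa using List.mem_takeWhile_imp hx'
    have hrest : rs'.dropWhile (fun x => pvIsBlankRow x == pvIsBlankRow r) = [] ∨
        ∃ y ys, rs'.dropWhile (fun x => pvIsBlankRow x == pvIsBlankRow r) = y :: ys ∧
          pvIsBlankRow y ≠ pvIsBlankRow r := by
      rcases hd : rs'.dropWhile (fun x => pvIsBlankRow x == pvIsBlankRow r) with _ | ⟨y, ys⟩
      · exact Or.inl rfl
      · refine Or.inr ⟨y, ys, rfl, ?_⟩
        have := List.head_dropWhile_not (fun x => pvIsBlankRow x == pvIsBlankRow r) (l := rs')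
          (by simp [hd])
        simpa [hd] using this
    rw [pvGroupRuns]
    by_cases hb : pvIsBlankRow r = true
    · -- blank run
      by_cases hlen : ((r :: rs'.takeWhile (fun x => pvIsBlankRow x == pvIsBlankRow r)).length : Int) > allowed
      · conv_lhs => rw [hsplit]
        rw [pvALoop_blank_break allowed _ (fun x hx => (hg x hx).trans hb) _ 0
            (by simp) (by omega)]
        simp only [pvBLoop]
        rw [if_pos hb, if_pos hlen]
      · conv_lhs => rw [hsplit]
        rw [pvALoop_blank_ok allowed _ (fun x hx => (hg x hx).trans hb) _ 0 (by omega)]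
        rw [pvALoop_reset allowed _ _ (by
          rcases hrest with h | ⟨y, ys, hys, hy⟩
          · exact Or.inl h
          · exact Or.inr ⟨y, ys, hys, by rw [hb] at hy; simpa using hy⟩)]
        simp only [pvBLoop]
        rw [if_pos hb, if_neg hlen]
        exact ihx
    · -- non-blank run
      have hb' : pvIsBlankRow r = false := by simpa using hb
      conv_lhs => rw [hsplit]
      rw [pvALoop_nonblank allowed _ (fun x hx => (hg x hx).trans hb') _]
      simp only [pvBLoop]
      rw [if_neg (by simp [hb']), ihx]

-- ===== VERDICT (by name: the statement is the Claim_ definition above) =====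
theorem strip_blank_rows_py_spec : Claim_equal_strip_blank_rows_py := by
  intro rows allowed _
  unfold Spec_strip_blank_rows_py strip_blank_rows_py strip_blank_rows_py_alt
  exact main_lemma allowed rows
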